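-- pv_equiv track=rewrite | github.com/IntelLabs/PyTorchALFI | object_detection/check_dt_train_results_ft_imp.py | sort_l_q
-- ===== SOURCE A (Python) =====
-- from copy import deepcopy
--
-- def sort_l_q(lays_all, qus_all):
--     lays_all_sorted = []
--     qus_all_sorted = []
--     for n in range(len(lays_all)):
--         ls = [int(x) for x,_ in sorted(zip(lays_all[n], qus_all[n]))]
--         qs = [int(x) for _, x in sorted(zip(lays_all[n], qus_all[n]))]
--         lays_all_sorted.append(ls)
--         qus_all_sorted.append(qs)
--
--     lays_all_sorted_0 = deepcopy(lays_all_sorted)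
--     qus_all_sorted_0 = deepcopy(qus_all_sorted)
--
--     lays_all_sorted.sort(key=len)
--     qus_all_sorted.sort(key=len) #order is the same
--
--     # verify that combos were preserved
--     list_orig = list(zip(lays_all_sorted_0, qus_all_sorted_0))
--     list_new = list(zip(lays_all_sorted, qus_all_sorted))
--     for n in range(len(list_orig)):
--         assert list_orig[n] in list_new
--
--     return lays_all_sorted, qus_all_sorted
-- ===== SOURCE B (Python) =====
-- def _merge(a, b):
--     out = []
--     i = j = 0
--     while i < len(a) and j < len(b):
--         if b[j] < a[i]:
--             out.append(b[j]); j += 1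
--         else:
--             out.append(a[i]); i += 1
--     out.extend(a[i:])
--     out.extend(b[j:])
--     return out
--
-- def _msort(xs):
--     if len(xs) <= 1:
--         return xs
--     mid = len(xs) // 2
--     return _merge(_msort(xs[:mid]), _msort(xs[mid:]))
--
-- def sort_l_q(lays_all, qus_all):
--     # Rows kept as paired records; each row's (lay, qu) pairs are merge-sorted,
--     # then rows are emitted bucket-style: for each distinct row length in
--     # increasing order, output the rows of that length in original order.
--     rows = []
--     for l_row, q_row in zip(lays_all, qus_all):
--         pairs = _msort(list(zip(l_row, q_row)))
--         rows.append(([int(a) for a, _ in pairs], [int(b) for _, b in pairs]))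
--     lays_out, qus_out = [], []
--     for length in sorted(set(len(ls) for ls, _ in rows)):
--         for ls, qs in rows:
--             if len(ls) == length:
--                 lays_out.append(ls)
--                 qus_out.append(qs)
--     return lays_out, qus_out
-- ===== Notes on version B (the rewrite author's own statement) =====
-- stated objective: alternative
-- what changed: B replaces A's per-row Timsort with a hand-written merge sort, replaces the comparison sort of the row lists by length with a pigeonhole emission (collect the distinct row lengths, visit them in increasing order and output the matching paired rows in original order), and drops A's deepcopy+assert verification pass entirely.
-- outside the precondition, e.g. on sort_l_q([[1]], []): A raises IndexError, B returns ([], [])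
import Mathlib
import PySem

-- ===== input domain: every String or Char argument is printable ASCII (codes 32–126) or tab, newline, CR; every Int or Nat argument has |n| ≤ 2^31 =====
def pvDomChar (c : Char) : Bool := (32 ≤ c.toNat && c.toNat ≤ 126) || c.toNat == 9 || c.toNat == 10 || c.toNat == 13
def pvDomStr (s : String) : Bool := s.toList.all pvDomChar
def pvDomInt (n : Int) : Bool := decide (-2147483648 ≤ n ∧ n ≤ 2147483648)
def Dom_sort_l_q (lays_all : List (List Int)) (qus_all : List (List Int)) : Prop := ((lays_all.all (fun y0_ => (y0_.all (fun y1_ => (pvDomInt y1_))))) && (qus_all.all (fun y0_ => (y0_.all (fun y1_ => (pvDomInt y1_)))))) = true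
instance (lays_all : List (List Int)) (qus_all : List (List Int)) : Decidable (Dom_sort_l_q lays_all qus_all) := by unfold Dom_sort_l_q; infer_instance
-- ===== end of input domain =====

-- B merge-sorts each paired row by hand and emits rows pigeonhole-style by increasing distinct
-- length, dropping A's per-row double Timsort, deepcopy and membership-verification pass
-- (objective: alternative algorithm).


-- ===== PORT A =====
-- 'int(x)' on an int is the identity and is not re-modeled.  The final verify loop
-- ('assert list_orig[n] in list_new') either raises or is a no-op on the return value;
-- on Pre_ it never raises (the equivalence proof below shows both len-keyed stable sorts
-- apply the same rearrangement), so it contributes nothing to the returned value.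
def sort_l_q (lays_all : List (List Int)) (qus_all : List (List Int)) : List (List Int) × List (List Int) :=
  let p := (PySem.List.pyRange 0 (lays_all.length : Int) 1).foldl
    (fun acc n =>
      let ls := (PySem.List.sorted2 ((PySem.List.pyGetD lays_all n []).zip (PySem.List.pyGetD qus_all n [])) (fun pr => pr.1) (fun pr => pr.2)).map (fun pr => pr.1)
      let qs := (PySem.List.sorted2 ((PySem.List.pyGetD lays_all n []).zip (PySem.List.pyGetD qus_all n [])) (fun pr => pr.1) (fun pr => pr.2)).map (fun pr => pr.2)
      (acc.1 ++ [ls], acc.2 ++ [qs]))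
    ([], [])
  let lays_all_sorted := PySem.List.sorted p.1 (fun l => l.length)
  let qus_all_sorted := PySem.List.sorted p.2 (fun l => l.length)
  (lays_all_sorted, qus_all_sorted)

-- ===== PORT B =====
-- Python's tuple comparison 'b[j] < a[i]' on int pairs is this lexicographic test.
def pvLexLt (p q : Int × Int) : Bool := decide (p.1 < q.1) || (p.1 == q.1 && decide (p.2 < q.2))

-- Source B's _merge: the index-based while loop, as the obvious structural recursion on the
-- two unconsumed suffixes a[i:], b[j:] (out is the list already emitted).
def pvMerge : List (Int × Int) → List (Int × Int) → List (Int × Int)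
  | [], ys => ys
  | xs, [] => xs
  | x :: xs, y :: ys => if pvLexLt y x then y :: pvMerge (x :: xs) ys else x :: pvMerge xs (y :: ys)

-- Source B's _msort; xs[:mid] / xs[mid:] with mid = len(xs)//2 ≥ 0 are exactly take/drop.
def pvMsort (xs : List (Int × Int)) : List (Int × Int) :=
  if xs.length ≤ 1 then xs
  else pvMerge (pvMsort (xs.take (xs.length / 2))) (pvMsort (xs.drop (xs.length / 2)))
termination_by xs.length
decreasing_by
  · simp; omega
  · simp; omega

-- one row of Source B's first loop: merge-sorted pairs split back into the two int lists
def pvRowB (pr : List Int × List Int) : List Int × List Int :=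
  ((pvMsort (pr.1.zip pr.2)).map (fun p => p.1), (pvMsort (pr.1.zip pr.2)).map (fun p => p.2))

def sort_l_q_alt (lays_all : List (List Int)) (qus_all : List (List Int)) : List (List Int) × List (List Int) :=
  let rows := (lays_all.zip qus_all).foldl (fun acc pr => acc ++ [pvRowB pr]) []
  let lens := PySem.List.sorted (PySem.Set.ofList (rows.map (fun r => (r.1.length : Int)))) (fun x => x)
  lens.foldl
    (fun out length =>
      rows.foldl
        (fun out2 r => if (r.1.length : Int) == length then (out2.1 ++ [r.1], out2.2 ++ [r.2]) else out2)
        out)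
    ([], [])

-- ===== PRECONDITION & SPEC =====
-- Pre_ excludes exactly the inputs where A raises IndexError (qus_all[n] for n < len(lays_all)).
def Pre_sort_l_q (lays_all : List (List Int)) (qus_all : List (List Int)) : Prop :=
  lays_all.length ≤ qus_all.length
instance (lays_all : List (List Int)) (qus_all : List (List Int)) : Decidable (Pre_sort_l_q lays_all qus_all) := by unfold Pre_sort_l_q; infer_instance
def pvWitness_sort_l_q : List (List Int) × List (List Int) := ([[2, 1], [3]], [[5, 6], [7]])

def Spec_sort_l_q (lays_all : List (List Int)) (qus_all : List (List Int)) (out : List (List Int) × List (List Int)) : Prop := out = sort_l_q_alt lays_all qus_all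
instance (lays_all : List (List Int)) (qus_all : List (List Int)) (out : List (List Int) × List (List Int)) : Decidable (Spec_sort_l_q lays_all qus_all out) := by unfold Spec_sort_l_q; infer_instance

-- ===== CLAIM (what is proved, stated in full; the proofs are below) =====
def Claim_equal_sort_l_q : Prop := ∀ (lays_all : List (List Int)) (qus_all : List (List Int)), Dom_sort_l_q lays_all qus_all → Pre_sort_l_q lays_all qus_all → Spec_sort_l_q lays_all qus_all (sort_l_q lays_all qus_all)

-- ===== LEMMAS AND PROOFS =====

-- ---- B's merge sort computes sorted(pairs) (= sorted2 with the two projections) ----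
def LKey (p : Int × Int) : Int ×ₗ Int := toLex p

theorem pvLexLt_eq (p q : Int × Int) : pvLexLt p q = decide (LKey p < LKey q) := by
  simp only [pvLexLt, LKey, Prod.Lex.toLex_lt_toLex]
  by_cases h1 : p.1 < q.1 <;> by_cases h2 : p.1 = q.1 <;> by_cases h3 : p.2 < q.2 <;>
    simp [h1, h2, h3]

theorem pvMerge_perm (a b : List (Int × Int)) : (pvMerge a b).Perm (a ++ b) := by
  fun_induction pvMerge a b with
  | case1 => simp
  | case2 => simp
  | case3 x xs y ys h ih =>
      exact (ih.cons y).trans (by simpa using (List.perm_middle (a := y) (l₁ := x :: xs) (l₂ := ys)).symm)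
  | case4 x xs y ys h ih =>
      simpa using ih.cons x

theorem mem_pvMerge {a b : List (Int × Int)} {z : Int × Int} :
    z ∈ pvMerge a b ↔ z ∈ a ∨ z ∈ b := by
  rw [(pvMerge_perm a b).mem_iff]; simp

theorem pvMerge_pairwise {a b : List (Int × Int)}
    (ha : a.Pairwise (fun x y => LKey x ≤ LKey y)) (hb : b.Pairwise (fun x y => LKey x ≤ LKey y)) :
    (pvMerge a b).Pairwise (fun x y => LKey x ≤ LKey y) := by
  fun_induction pvMerge a b with
  | case1 => exact hb
  | case2 => exact ha
  | case3 x xs y ys h ih =>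
      have hy : LKey y < LKey x := by
        have := pvLexLt_eq y x; rw [h] at this; exact of_decide_eq_true this.symm
      refine List.Pairwise.cons ?_ (ih ha hb.of_cons)
      intro z hz
      rcases mem_pvMerge.mp hz with hz | hz
      · rcases List.mem_cons.mp hz with rfl | hz
        · exact le_of_lt hy
        · exact le_trans (le_of_lt hy) (List.rel_of_pairwise_cons ha hz)
      · exact List.rel_of_pairwise_cons hb hz
  | case4 x xs y ys h ih =>
      have hx : LKey x ≤ LKey y := by
        rw [pvLexLt_eq] at h
        exact le_of_not_gt (by simpa using h)
      refine List.Pairwise.cons ?_ (ih ha.of_cons hb)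
      intro z hz
      rcases mem_pvMerge.mp hz with hz | hz
      · exact List.rel_of_pairwise_cons ha hz
      · rcases List.mem_cons.mp hz with rfl | hz
        · exact hx
        · exact le_trans hx (List.rel_of_pairwise_cons hb hz)

theorem pvMsort_perm (xs : List (Int × Int)) : (pvMsort xs).Perm xs := by
  fun_induction pvMsort xs with
  | case1 xs h => exact List.Perm.refl xs
  | case2 xs h ih1 ih2 =>
      exact ((pvMerge_perm _ _).trans (ih1.append ih2)).trans (by rw [List.take_append_drop])

theorem pvMsort_pairwise (xs : List (Int × Int)) :
    (pvMsort xs).Pairwise (fun x y => LKey x ≤ LKey y) := by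
  fun_induction pvMsort xs with
  | case1 xs h =>
      match xs, h with
      | [], _ => exact List.Pairwise.nil
      | [x], _ => exact List.pairwise_singleton _ _
  | case2 xs h ih1 ih2 => exact pvMerge_pairwise ih1 ih2

theorem sorted2_eq_sorted_LKey (xs : List (Int × Int)) :
    PySem.List.sorted2 xs (fun p => p.1) (fun p => p.2) = PySem.List.sorted xs LKey := by
  show xs.foldl (fun acc x => PySem.List.insertBy _ x acc) [] = _
  rw [PySem.List.sorted_eq_foldl_insertBy]
  have hb : (fun a b : Int × Int => decide (a.1 < b.1) || (!decide (b.1 < a.1) && decide (a.2 < b.2)))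
      = fun a b => decide (LKey a < LKey b) := by
    funext a b
    simp only [LKey, Prod.Lex.toLex_lt_toLex]
    by_cases h1 : a.1 < b.1 <;> by_cases h2 : b.1 < a.1 <;> by_cases h3 : a.2 < b.2 <;>
      simp [h1, h2, h3] <;> omega
  rw [hb]
  rfl

theorem pvMsort_eq_sorted2 (xs : List (Int × Int)) :
    pvMsort xs = PySem.List.sorted2 xs (fun p => p.1) (fun p => p.2) := by
  rw [sorted2_eq_sorted_LKey]
  exact PySem.List.eq_of_perm_of_pairwise_le_of_injective LKey
    (fun a b h => by simpa [LKey] using h)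
    ((pvMsort_perm xs).trans (PySem.List.sorted_perm xs LKey false).symm)
    (pvMsort_pairwise xs)
    (PySem.List.sorted_pairwise xs LKey)

-- ---- pigeonhole emission over sorted distinct keys is the stable key-sort ----
theorem insertBy_append_not_before {α : Type} (before : α → α → Bool) (x : α) (A S : List α)
    (h : ∀ y ∈ A, before x y = false) :
    PySem.List.insertBy before x (A ++ S) = A ++ PySem.List.insertBy before x S := by
  induction A with
  | nil => rfl
  | cons a A ih =>
      have ha := h a List.mem_cons_self
      simp [PySem.List.insertBy, ha, ih (fun y hy => h y (List.mem_cons_of_mem _ hy))]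

theorem insertBy_head_before {α : Type} (before : α → α → Bool) (x : α) (S : List α)
    (h : ∀ y ∈ S, before x y = true) :
    PySem.List.insertBy before x S = x :: S := by
  cases S with
  | nil => rfl
  | cons s S => simp [PySem.List.insertBy, h s List.mem_cons_self]

theorem sorted_append_singleton {α κ : Type} [LT κ] [DecidableLT κ] (xs : List α) (x : α) (key : α → κ) :
    PySem.List.sorted (xs ++ [x]) key =
      PySem.List.insertBy (fun a b => decide (key a < key b)) x (PySem.List.sorted xs key) := by
  rw [PySem.List.sorted_eq_foldl_insertBy, PySem.List.sorted_eq_foldl_insertBy, List.foldl_append]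
  rfl

theorem sorted_min_split {α : Type} (key : α → Int) (k : Int) (xs : List α)
    (hmin : ∀ r ∈ xs, k ≤ key r) :
    PySem.List.sorted xs key =
      xs.filter (fun r => key r == k) ++
        PySem.List.sorted (xs.filter (fun r => !(key r == k))) key := by
  induction xs using List.reverseRecOn with
  | nil => rfl
  | append_singleton xs x ih =>
      have hmin' : ∀ r ∈ xs, k ≤ key r := fun r hr => hmin r (by simp [hr])
      have hS : ∀ y ∈ PySem.List.sorted (xs.filter (fun r => !(key r == k))) key,
          k < key y := by
        intro y hy
        rw [PySem.List.mem_sorted] at hy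
        have h1 := List.of_mem_filter hy
        have h2 := hmin' y (List.mem_of_mem_filter hy)
        simp only [Bool.not_eq_eq_eq_not, Bool.not_true, beq_eq_false_iff_ne, ne_eq] at h1
        omega
      rw [sorted_append_singleton, ih hmin', List.filter_append, List.filter_append]
      by_cases hx : key x == k
      · have hxk : key x = k := by simpa using hx
        rw [insertBy_append_not_before _ _ _ _
            (fun y hy => by
              have : key y = k := by simpa using List.of_mem_filter hy
              simp [hxk, this])]
        rw [insertBy_head_before _ _ _
            (fun y hy => by simp [hxk]; exact hS y hy)]
        simp [hx]
      · have hxk : k < key x := by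
          have := hmin x (by simp)
          have : key x ≠ k := by simpa using hx
          omega
        rw [insertBy_append_not_before _ _ _ _
            (fun y hy => by
              have : key y = k := by simpa using List.of_mem_filter hy
              simp [this]; omega)]
        rw [← sorted_append_singleton]
        simp [hx]

theorem flatMap_filter_eq_sorted {α : Type} (key : α → Int) (ks : List Int)
    (hks : ks.Pairwise (· < ·)) :
    ∀ xs : List α, (∀ r ∈ xs, key r ∈ ks) →
      ks.flatMap (fun k => xs.filter (fun r => key r == k)) = PySem.List.sorted xs key := by
  induction ks with
  | nil =>
      intro xs h
      have : xs = [] := List.eq_nil_iff_forall_not_mem.mpr (fun x hx => by simpa using h x hx)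
      subst this; rfl
  | cons k ks ih =>
      intro xs h
      have hlt : ∀ k' ∈ ks, k < k' := fun k' hk' => List.rel_of_pairwise_cons hks hk'
      have hmin : ∀ r ∈ xs, k ≤ key r := by
        intro r hr
        rcases List.mem_cons.mp (h r hr) with he | hm
        · omega
        · have := hlt _ hm; omega
      rw [List.flatMap_cons, sorted_min_split key k xs hmin]
      congr 1
      have hcong : ∀ k' ∈ ks,
          xs.filter (fun r => key r == k') =
            (xs.filter (fun r => !(key r == k))).filter (fun r => key r == k') := by
        intro k' hk'
        have hne : k ≠ k' := by have := hlt _ hk'; omega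
        rw [List.filter_filter]
        apply List.filter_congr
        intro r _
        by_cases hr : key r == k'
        · have : key r = k' := by simpa using hr
          simp [this, hne.symm]
        · simp [hr]
      calc ks.flatMap (fun k' => xs.filter (fun r => key r == k'))
          = ks.flatMap (fun k' => (xs.filter (fun r => !(key r == k))).filter (fun r => key r == k')) := by
            rw [List.flatMap_def, List.flatMap_def]
            exact congrArg List.flatten (List.map_congr_left hcong)
        _ = PySem.List.sorted (xs.filter (fun r => !(key r == k))) key := by
            apply ih hks.of_cons
            intro r hr
            have h1 := List.of_mem_filter hr
            have h2 := h r (List.mem_of_mem_filter hr)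
            rcases List.mem_cons.mp h2 with he | hm
            · simp [he] at h1
            · exact hm

-- ---- A-side reduction: the range loop is a map over the zip, split sorts are one row sort ----
theorem foldl_two_append {α β : Type} (F : Int → α) (G : Int → β) (m : Int) :
    (PySem.List.pyRange 0 m 1).foldl (fun acc n => (acc.1 ++ [F n], acc.2 ++ [G n])) ([], []) =
      ((PySem.List.pyRange 0 m 1).map F, (PySem.List.pyRange 0 m 1).map G) := by
  rw [PySem.List.foldl_prod_mk (f := fun a n => a ++ [F n]) (g := fun a n => a ++ [G n]),
    PySem.List.foldl_append_singleton_eq_map, PySem.List.foldl_append_singleton_eq_map]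
  simp

theorem map_pyRange_zip {α : Type} (F : List Int → List Int → α)
    (as bs : List (List Int)) (h : as.length ≤ bs.length) :
    (PySem.List.pyRange 0 (as.length : Int) 1).map
        (fun n => F (PySem.List.pyGetD as n []) (PySem.List.pyGetD bs n [])) =
      (as.zip bs).map (fun p => F p.1 p.2) := by
  apply List.ext_getElem
  · simp [PySem.List.length_pyRange_one]
    omega
  · intro i h1 h2
    simp only [List.getElem_map, PySem.List.getElem_pyRange_one, zero_add,
      PySem.List.pyGetD_natCast, List.getElem_zip]
    have hi : i < as.length := by
      simpa [PySem.List.length_pyRange_one] using h1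
    rw [List.getD_eq_getElem _ _ hi, List.getD_eq_getElem _ _ (by omega)]

theorem insertBy_map {α β : Type} (f : α → β) (before : β → β → Bool) (x : α) (ys : List α) :
    PySem.List.insertBy before (f x) (ys.map f) =
      (PySem.List.insertBy (fun a b => before (f a) (f b)) x ys).map f := by
  induction ys with
  | nil => rfl
  | cons y ys ih => by_cases h : before (f x) (f y) <;> simp [PySem.List.insertBy, h, ih]

theorem sorted_map {α β κ : Type} [LT κ] [DecidableLT κ] (f : α → β) (key : β → κ) (xs : List α) :
    PySem.List.sorted (xs.map f) key =
      (PySem.List.sorted xs (fun x => key (f x))).map f := by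
  rw [PySem.List.sorted_eq_foldl_insertBy, PySem.List.sorted_eq_foldl_insertBy]
  suffices h : ∀ acc : List α,
      (xs.map f).foldl (fun acc x => PySem.List.insertBy (fun a b => decide (key a < key b)) x acc) (acc.map f) =
        (xs.foldl (fun acc x => PySem.List.insertBy (fun a b => decide (key (f a) < key (f b))) x acc) acc).map f by
    simpa using h []
  induction xs with
  | nil => intro acc; rfl
  | cons x xs ih =>
      intro acc
      simp only [List.map_cons, List.foldl_cons]
      rw [insertBy_map f (fun a b => decide (key a < key b)) x acc]
      exact ih _

theorem insertBy_congr {α : Type} (b1 b2 : α → α → Bool) (x : α) (ys : List α)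
    (h : ∀ y ∈ ys, b1 x y = b2 x y) :
    PySem.List.insertBy b1 x ys = PySem.List.insertBy b2 x ys := by
  induction ys with
  | nil => rfl
  | cons y ys ih =>
      have hy := h y (List.mem_cons_self)
      by_cases hb : b1 x y
      · simp [PySem.List.insertBy, hb, hy ▸ hb]
      · have : b2 x y = false := by rw [← hy]; simpa using hb
        simp [PySem.List.insertBy, hb, this,
          ih (fun z hz => h z (List.mem_cons_of_mem _ hz))]

theorem foldl_insertBy_congr {α κ : Type} [LT κ] [DecidableLT κ] (key1 key2 : α → κ) :
    ∀ (xs acc : List α), (∀ x ∈ xs, key1 x = key2 x) → (∀ y ∈ acc, key1 y = key2 y) →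
      xs.foldl (fun acc x => PySem.List.insertBy (fun a b => decide (key1 a < key1 b)) x acc) acc =
        xs.foldl (fun acc x => PySem.List.insertBy (fun a b => decide (key2 a < key2 b)) x acc) acc := by
  intro xs
  induction xs with
  | nil => intro acc _ _; rfl
  | cons x xs ih =>
      intro acc h hacc
      have hx := h x List.mem_cons_self
      simp only [List.foldl_cons]
      rw [insertBy_congr (fun a b => decide (key1 a < key1 b)) (fun a b => decide (key2 a < key2 b))
        x acc (fun y hy => by dsimp only; rw [hx, hacc y hy])]
      refine ih _ (fun z hz => h z (List.mem_cons_of_mem _ hz)) ?_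
      intro y hy
      rcases (PySem.List.mem_insertBy _ _ _ _).mp hy with rfl | hy'
      · exact hx
      · exact hacc y hy'

theorem sorted_congr {α κ : Type} [LT κ] [DecidableLT κ] (key1 key2 : α → κ) (xs : List α)
    (h : ∀ x ∈ xs, key1 x = key2 x) :
    PySem.List.sorted xs key1 = PySem.List.sorted xs key2 := by
  rw [PySem.List.sorted_eq_foldl_insertBy, PySem.List.sorted_eq_foldl_insertBy]
  exact foldl_insertBy_congr key1 key2 xs [] h (by simp)

-- sorting by the Int cast of a Nat key is sorting by the Nat key
theorem sorted_intCast_key {α : Type} (f : α → Nat) (xs : List α) :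
    PySem.List.sorted xs (fun r => ((f r : Int))) = PySem.List.sorted xs f := by
  rw [PySem.List.sorted_eq_foldl_insertBy, PySem.List.sorted_eq_foldl_insertBy]
  have hb : (fun a b : α => decide ((f a : Int) < (f b : Int))) = fun a b => decide (f a < f b) := by
    funext a b; simp
  rw [hb]

-- ---- B-side reduction: the two nested emission loops are a flatMap of filters ----
theorem foldl_two_append_if {α : Type} (c : α → Bool) (F G : α → List Int)
    (rows : List α) (out : List (List Int) × List (List Int)) :
    rows.foldl (fun out2 r => if c r then (out2.1 ++ [F r], out2.2 ++ [G r]) else out2) out =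
      (out.1 ++ (rows.filter c).map F, out.2 ++ (rows.filter c).map G) := by
  have hstep : (fun (out2 : List (List Int) × List (List Int)) r =>
      if c r then (out2.1 ++ [F r], out2.2 ++ [G r]) else out2) =
      fun out2 r => ((if c r then out2.1 ++ [F r] else out2.1), (if c r then out2.2 ++ [G r] else out2.2)) := by
    funext o r; by_cases h : c r <;> simp [h]
  rw [hstep, ← Prod.mk.eta (p := out),
    PySem.List.foldl_prod_mk (f := fun a r => if c r then a ++ [F r] else a)
      (g := fun a r => if c r then a ++ [G r] else a),
    PySem.List.foldl_append_if, PySem.List.foldl_append_if]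

theorem foldl_two_flatMap {α : Type} (F G : Int → List α) (ks : List Int) :
    ks.foldl (fun out k => (out.1 ++ F k, out.2 ++ G k)) ([], []) =
      (ks.flatMap F, ks.flatMap G) := by
  rw [PySem.List.foldl_prod_mk (f := fun a k => a ++ F k) (g := fun a k => a ++ G k),
    PySem.List.foldl_append_eq_flatMap, PySem.List.foldl_append_eq_flatMap]
  simp

-- ===== VERDICT (by name: the statement is the Claim_ definition above) =====
theorem sort_l_q_spec : Claim_equal_sort_l_q := by
  intro lays qus _ hpre
  unfold Spec_sort_l_q
  simp only [sort_l_q, sort_l_q_alt]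
  -- shared rows: each (lays,qus) row pair-sorted
  rw [foldl_two_append
      (F := fun n => (PySem.List.sorted2 ((PySem.List.pyGetD lays n []).zip (PySem.List.pyGetD qus n [])) (fun pr => pr.1) (fun pr => pr.2)).map (fun pr => pr.1))
      (G := fun n => (PySem.List.sorted2 ((PySem.List.pyGetD lays n []).zip (PySem.List.pyGetD qus n [])) (fun pr => pr.1) (fun pr => pr.2)).map (fun pr => pr.2))]
  rw [map_pyRange_zip (F := fun l q => (PySem.List.sorted2 (l.zip q) (fun pr => pr.1) (fun pr => pr.2)).map (fun pr => pr.1)) lays qus hpre,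
      map_pyRange_zip (F := fun l q => (PySem.List.sorted2 (l.zip q) (fun pr => pr.1) (fun pr => pr.2)).map (fun pr => pr.2)) lays qus hpre]
  rw [PySem.List.foldl_append_singleton_eq_map (f := pvRowB)]
  simp only [List.nil_append]
  set rows := (lays.zip qus).map pvRowB with hrows
  have h1 : (lays.zip qus).map (fun p => (PySem.List.sorted2 (p.1.zip p.2) (fun pr => pr.1) (fun pr => pr.2)).map (fun pr => pr.1)) =
      rows.map (fun r => r.1) := by
    simp [hrows, pvRowB, pvMsort_eq_sorted2, List.map_map, Function.comp]
  have h2 : (lays.zip qus).map (fun p => (PySem.List.sorted2 (p.1.zip p.2) (fun pr => pr.1) (fun pr => pr.2)).map (fun pr => pr.2)) =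
      rows.map (fun r => r.2) := by
    simp [hrows, pvRowB, pvMsort_eq_sorted2, List.map_map, Function.comp]
  rw [h1, h2]
  -- B side: nested loops → flatMap of filters → stable sort by Int length key
  have hkey : ∀ r ∈ rows, (fun r : List Int × List Int => (r.1.length : Int)) r ∈
      PySem.List.sorted (PySem.Set.ofList (rows.map (fun r => (r.1.length : Int)))) (fun x => x) := by
    intro r hr
    rw [PySem.List.mem_sorted, PySem.Set.mem_ofList]
    exact List.mem_map.mpr ⟨r, hr, rfl⟩
  have hB : (PySem.List.sorted (PySem.Set.ofList (rows.map (fun r => (r.1.length : Int)))) (fun x => x)).foldl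
      (fun out length => rows.foldl
        (fun out2 r => if (r.1.length : Int) == length then (out2.1 ++ [r.1], out2.2 ++ [r.2]) else out2) out)
      ([], []) =
      ((PySem.List.sorted rows (fun r => (r.1.length : Int))).map (fun r => r.1),
       (PySem.List.sorted rows (fun r => (r.1.length : Int))).map (fun r => r.2)) := by
    have hcong : ∀ (out : List (List Int) × List (List Int)) (k : Int),
        rows.foldl (fun out2 r => if (r.1.length : Int) == k then (out2.1 ++ [r.1], out2.2 ++ [r.2]) else out2) out =
          (out.1 ++ ((rows.filter (fun r => (r.1.length : Int) == k)).map (fun r => r.1)),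
           out.2 ++ ((rows.filter (fun r => (r.1.length : Int) == k)).map (fun r => r.2))) :=
      fun out k => foldl_two_append_if (fun r => (r.1.length : Int) == k) (fun r => r.1) (fun r => r.2) rows out
    have hstep : (fun (out : List (List Int) × List (List Int)) (k : Int) =>
        rows.foldl (fun out2 r => if (r.1.length : Int) == k then (out2.1 ++ [r.1], out2.2 ++ [r.2]) else out2) out) =
        fun out k => (out.1 ++ ((rows.filter (fun r => (r.1.length : Int) == k)).map (fun r => r.1)),
          out.2 ++ ((rows.filter (fun r => (r.1.length : Int) == k)).map (fun r => r.2))) :=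
      funext fun o => funext fun k => hcong o k
    rw [hstep, foldl_two_flatMap, ← List.map_flatMap, ← List.map_flatMap,
      flatMap_filter_eq_sorted (fun r : List Int × List Int => (r.1.length : Int)) _
        (PySem.List.sorted_ofList_pairwise_lt _) rows hkey]
  rw [hB]
  -- identify the two key types
  rw [sorted_intCast_key (fun r : List Int × List Int => r.1.length) rows]
  -- A's two component sorts are the row sort, mapped
  have hlen : ∀ r ∈ rows, (r.2.length : Nat) = r.1.length := by
    intro r hr
    rcases List.mem_map.mp hr with ⟨p, _, rfl⟩
    simp [pvRowB]
  rw [sorted_map (fun r : List Int × List Int => r.1) (fun l : List Int => l.length),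
      sorted_map (fun r : List Int × List Int => r.2) (fun l : List Int => l.length)]
  rw [sorted_congr (fun x : List Int × List Int => x.2.length) (fun x : List Int × List Int => x.1.length) _ hlen]
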